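-- pv_equiv track=rewrite | github.com/ArseniiGav/Electronics_analysis | find_file_and_ent_number.py | find_file_and_ent_number
-- ===== SOURCE A (Python) =====
-- def find_file_and_ent_number(EvtNumber, shape_cumsum):
--     if EvtNumber < shape_cumsum[0]:
--         FileNumber = ''
--     else:
--         for i in range(len(shape_cumsum)-1):
--             if EvtNumber >= shape_cumsum[i] and EvtNumber < shape_cumsum[i+1]:
--                 FileNumber = f"_{i+1}"
--                 EvtNumber -= shape_cumsum[i]
--                 break
--
--     return EvtNumber, FileNumber
-- ===== SOURCE B (Python) =====
-- def find_file_and_ent_number(EvtNumber, shape_cumsum):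
--     # Binary search (bisect_right, hand-rolled) on the nondecreasing cumsum array.
--     if EvtNumber < shape_cumsum[0]:
--         return EvtNumber, ''
--     lo, hi = 0, len(shape_cumsum)
--     while lo < hi:
--         mid = (lo + hi) // 2
--         if shape_cumsum[mid] <= EvtNumber:
--             lo = mid + 1
--         else:
--             hi = mid
--     return EvtNumber - shape_cumsum[lo - 1], f"_{lo}"
-- ===== Notes on version B (the rewrite author's own statement) =====
-- stated objective: faster
-- what changed: Replaces A's linear scan over adjacent cumsum pairs by a hand-written binary search (bisect_right) that locates the containing interval in O(log n).
-- outside the precondition, e.g. on find_file_and_ent_number(5, [0, 10, 2, 20]): A returns (5, '_1'), B returns (3, '_3')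
import Mathlib
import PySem

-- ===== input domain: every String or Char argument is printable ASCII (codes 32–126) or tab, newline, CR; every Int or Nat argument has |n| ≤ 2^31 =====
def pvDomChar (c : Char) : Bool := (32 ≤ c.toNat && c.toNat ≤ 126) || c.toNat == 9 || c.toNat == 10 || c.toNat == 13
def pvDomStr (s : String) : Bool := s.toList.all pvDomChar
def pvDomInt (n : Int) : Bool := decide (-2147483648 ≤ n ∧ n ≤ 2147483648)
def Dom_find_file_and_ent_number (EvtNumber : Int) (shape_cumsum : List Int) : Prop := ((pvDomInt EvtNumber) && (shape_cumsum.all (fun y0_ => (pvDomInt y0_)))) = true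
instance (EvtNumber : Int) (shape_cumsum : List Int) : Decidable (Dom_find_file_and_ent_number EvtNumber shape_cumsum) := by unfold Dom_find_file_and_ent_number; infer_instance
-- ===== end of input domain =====

-- B replaces A's linear scan over adjacent cumsum pairs by a hand-written binary search (bisect_right); equality proved on nonempty nondecreasing arrays with EvtNumber below the last cumsum.


-- ===== PORT A =====
-- A's for-loop over i in range(len-1), with break at the first window s[i] <= E < s[i+1];
-- falling through leaves FileNumber unbound (Python raises UnboundLocalError) — outside Pre_, default (E, "").
def pvALoop (E : Int) (s : List Int) (i : Nat) : Int × String :=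
  if _h : i < s.length - 1 then
    if s.getD i 0 ≤ E ∧ E < s.getD (i + 1) 0 then
      (E - s.getD i 0, "_" ++ PySem.Int.toStr ((i : Int) + 1))
    else pvALoop E s (i + 1)
  else (E, "")
termination_by s.length - 1 - i

def find_file_and_ent_number (EvtNumber : Int) (shape_cumsum : List Int) : Int × String :=
  match PySem.List.pyGet? shape_cumsum 0 with
  | none => (EvtNumber, "")  -- shape_cumsum[0] raises IndexError on []; outside Pre_
  | some s0 =>
    if EvtNumber < s0 then (EvtNumber, "")
    else pvALoop EvtNumber shape_cumsum 0

-- ===== PORT B =====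
-- while lo < hi: mid = (lo+hi)//2; advance lo or shrink hi  (hand-written bisect_right)
def pvBSearch (E : Int) (s : List Int) (lo hi : Nat) : Nat :=
  if _h : lo < hi then
    let mid := (lo + hi) / 2
    if s.getD mid 0 ≤ E then pvBSearch E s (mid + 1) hi else pvBSearch E s lo mid
  else lo
termination_by hi - lo

def find_file_and_ent_number_alt (EvtNumber : Int) (shape_cumsum : List Int) : Int × String :=
  match PySem.List.pyGet? shape_cumsum 0 with
  | none => (EvtNumber, "")  -- shape_cumsum[0] raises IndexError on []; outside Pre_
  | some s0 =>
    if EvtNumber < s0 then (EvtNumber, "")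
    else
      let lo := pvBSearch EvtNumber shape_cumsum 0 shape_cumsum.length
      (EvtNumber - shape_cumsum.getD (lo - 1) 0, "_" ++ PySem.Int.toStr (lo : Int))

-- ===== PRECONDITION & SPEC =====
-- Pre_ excludes: the empty list (A raises IndexError), EvtNumber ≥ the last cumsum entry on a sorted list
-- (A's loop falls through and raises UnboundLocalError), and — only when EvtNumber ≥ shape_cumsum[0] —
-- non-nondecreasing lists, on which A still returns its first matching window: a cumulative-sum array is
-- nondecreasing by construction, and on an out-of-order one A's and B's interval picks are both accidental.
def Pre_find_file_and_ent_number (EvtNumber : Int) (shape_cumsum : List Int) : Prop :=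
  shape_cumsum ≠ [] ∧
    (EvtNumber < shape_cumsum.getD 0 0 ∨
      (shape_cumsum.Pairwise (· ≤ ·) ∧
        EvtNumber < shape_cumsum.getD (shape_cumsum.length - 1) 0))
instance (EvtNumber : Int) (shape_cumsum : List Int) : Decidable (Pre_find_file_and_ent_number EvtNumber shape_cumsum) := by unfold Pre_find_file_and_ent_number; infer_instance
def pvWitness_find_file_and_ent_number : Int × List Int := (3, [2, 5, 9])

def Spec_find_file_and_ent_number (EvtNumber : Int) (shape_cumsum : List Int) (out : Int × String) : Prop := out = find_file_and_ent_number_alt EvtNumber shape_cumsum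
instance (EvtNumber : Int) (shape_cumsum : List Int) (out : Int × String) : Decidable (Spec_find_file_and_ent_number EvtNumber shape_cumsum out) := by unfold Spec_find_file_and_ent_number; infer_instance

-- ===== CLAIM (what is proved, stated in full; the proofs are below) =====
def Claim_equal_find_file_and_ent_number : Prop := ∀ (EvtNumber : Int) (shape_cumsum : List Int), Dom_find_file_and_ent_number EvtNumber shape_cumsum → Pre_find_file_and_ent_number EvtNumber shape_cumsum → Spec_find_file_and_ent_number EvtNumber shape_cumsum (find_file_and_ent_number EvtNumber shape_cumsum)

-- ===== LEMMAS AND PROOFS =====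

-- nondecreasing list read through getD
lemma pv_mono (s : List Int) (hs : s.Pairwise (· ≤ ·)) {i k : Nat}
    (hik : i ≤ k) (hk : k < s.length) : s.getD i 0 ≤ s.getD k 0 := by
  rcases Nat.lt_or_ge i k with h | h
  · rw [List.getD_eq_getElem s 0 (Nat.lt_trans h hk), List.getD_eq_getElem s 0 hk]
    exact (List.pairwise_iff_getElem.mp hs) i k _ _ h
  · have : i = k := Nat.le_antisymm hik h
    subst this; rfl

-- binary-search invariant: the result j keeps everything below it ≤ E and everything from it on > E
lemma pvBSearch_spec (E : Int) (s : List Int) (hs : s.Pairwise (· ≤ ·))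
    (lo hi : Nat) (hlh : lo ≤ hi) (hhn : hi ≤ s.length)
    (hlow : ∀ k, k < lo → s.getD k 0 ≤ E)
    (hhigh : ∀ k, hi ≤ k → k < s.length → E < s.getD k 0) :
    lo ≤ pvBSearch E s lo hi ∧ pvBSearch E s lo hi ≤ hi ∧
    (∀ k, k < pvBSearch E s lo hi → s.getD k 0 ≤ E) ∧
    (∀ k, pvBSearch E s lo hi ≤ k → k < s.length → E < s.getD k 0) := by
  rw [pvBSearch]
  by_cases h : lo < hi
  · simp only [h, dif_pos]
    by_cases hc : s.getD ((lo + hi) / 2) 0 ≤ E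
    · simp only [hc, if_pos]
      have hrec := pvBSearch_spec E s hs ((lo + hi) / 2 + 1) hi (by omega) (by omega)
        (fun k hk => le_trans (pv_mono s hs (by omega) (by omega)) hc) hhigh
      exact ⟨by omega, hrec.2.1, hrec.2.2.1, hrec.2.2.2⟩
    · simp only [hc, if_neg, not_false_iff]
      push Not at hc
      have hrec := pvBSearch_spec E s hs lo ((lo + hi) / 2) (by omega) (by omega) hlow
        (fun k hk hk' => lt_of_lt_of_le hc (pv_mono s hs hk (by omega)))
      exact ⟨hrec.1, by omega, hrec.2.2.1, hrec.2.2.2⟩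
  · simp only [h, dif_neg, not_false_iff]
    exact ⟨le_refl _, hlh, hlow, fun k hk hk' => hhigh k (by omega) hk'⟩
termination_by hi - lo

-- A's scan from any i ≤ j-1 lands exactly on the window ending at j
lemma pvALoop_eq (E : Int) (s : List Int) (j : Nat)
    (hj1 : 1 ≤ j) (hjn : j + 1 ≤ s.length)
    (hlow : ∀ k, k < j → s.getD k 0 ≤ E) (hhi : E < s.getD j 0)
    (i : Nat) (hij : i ≤ j - 1) :
    pvALoop E s i = (E - s.getD (j - 1) 0, "_" ++ PySem.Int.toStr (j : Int)) := by
  rw [pvALoop]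
  have hrange : i < s.length - 1 := by omega
  simp only [hrange, dif_pos]
  by_cases hstop : i = j - 1
  · subst hstop
    have h1 : (j - 1) + 1 = j := by omega
    rw [h1]
    simp only [hlow (j - 1) (by omega), hhi, and_self, if_pos]
    have h2 : ((j - 1 : Nat) : Int) + 1 = (j : Int) := by omega
    rw [h2]
  · have hcond : ¬ (s.getD i 0 ≤ E ∧ E < s.getD (i + 1) 0) := by
      intro ⟨_, h2⟩
      exact absurd h2 (not_lt.mpr (hlow (i + 1) (by omega)))
    simp only [hcond, if_neg, not_false_iff]
    exact pvALoop_eq E s j hj1 hjn hlow hhi (i + 1) (by omega)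
termination_by j - 1 - i

-- ===== VERDICT (by name: the statement is the Claim_ definition above) =====
theorem find_file_and_ent_number_spec : Claim_equal_find_file_and_ent_number := by
  intro E s _hdom hpre
  obtain ⟨hne, hdisj⟩ := hpre
  unfold Spec_find_file_and_ent_number find_file_and_ent_number find_file_and_ent_number_alt
  have hn : 0 < s.length := List.length_pos_iff.mpr hne
  have h0 : PySem.List.pyGet? s 0 = some (s.getD 0 0) := by
    simp [PySem.List.pyGet?, PySem.List.pyIdx?, hn]
  rw [h0]
  dsimp only
  split_ifs with hlt
  · rfl
  · push Not at hlt
    obtain ⟨hsort, hlast⟩ := hdisj.resolve_left (not_lt.mpr hlt)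
    -- E ≥ s[0] and E < s[last] forces length ≥ 2
    have hn2 : 2 ≤ s.length := by
      by_contra h
      have h1 : s.length = 1 := by omega
      rw [h1] at hlast
      exact absurd hlast (not_lt.mpr (by simpa using hlt))
    have hspec := pvBSearch_spec E s hsort 0 s.length (Nat.zero_le _) (le_refl _)
      (by omega) (by omega)
    set j := pvBSearch E s 0 s.length with hj
    obtain ⟨-, hjle, hlow, hhi⟩ := hspec
    have hj1 : 1 ≤ j := by
      by_contra h
      have hj0 : j = 0 := by omega
      rw [hj0] at hhi
      exact absurd (hhi 0 (le_refl _) hn) (not_lt.mpr hlt)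
    have hjn : j + 1 ≤ s.length := by
      by_contra h
      exact absurd hlast (not_lt.mpr (hlow (s.length - 1) (by omega)))
    exact pvALoop_eq E s j hj1 hjn hlow (hhi j (le_refl _) (by omega)) 0 (Nat.zero_le _)
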